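-- pv_equiv track=rewrite | github.com/hikineet-umamichang/atcoder | arc161/b/main.py | solve
-- ===== SOURCE A (Python) =====
-- def solve(num):
--     if num < 7:
--         return -1
--
--     while bin(num).count("1") < 3:
--         num -= 1
--
--     tmp = bin(num)[2:]
--     ans = ""
--     cnt = 0
--     for i in range(len(tmp)):
--         if tmp[i] == "1" and cnt < 3:
--             ans += "1"
--             cnt += 1
--         else:
--             ans += "0"
--     return int(ans, 2)
-- ===== SOURCE B (Python) =====
-- def solve(num):
--     if num < 7:
--         return -1
--
--     while bin(num).count("1") < 3:
--         num -= 1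
--
--     ans = num
--     while bin(ans).count("1") > 3:
--         ans &= ans - 1
--     return ans
-- ===== Notes on version B (the rewrite author's own statement) =====
-- stated objective: alternative
-- what changed: Instead of rebuilding the binary string character-by-character and re-parsing it with int(...,2), B keeps the number and repeatedly clears the lowest set bit with the Kernighan trick ans &= ans-1 until only three bits remain.
import Mathlib
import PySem

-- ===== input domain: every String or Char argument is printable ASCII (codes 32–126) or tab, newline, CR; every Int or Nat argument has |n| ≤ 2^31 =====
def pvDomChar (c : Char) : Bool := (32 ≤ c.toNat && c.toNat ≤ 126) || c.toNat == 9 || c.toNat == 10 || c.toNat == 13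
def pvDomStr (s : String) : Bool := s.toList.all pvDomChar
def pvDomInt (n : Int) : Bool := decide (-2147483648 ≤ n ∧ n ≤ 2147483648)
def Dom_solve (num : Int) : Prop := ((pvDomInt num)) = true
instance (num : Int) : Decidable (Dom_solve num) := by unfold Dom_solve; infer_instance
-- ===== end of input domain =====

-- B keeps the number and clears the lowest set bit (ans &= ans-1) until three bits remain,
-- instead of A's rebuild-the-binary-string-and-reparse; alternative decomposition, same cost.

-- ===== PORT A =====
-- bitChar b = the binary digit character of b
def bitChar (b : Nat) : Char := if b = 1 then '1' else '0'

-- the digits of bin(n)[2:] for n > 0, MSB first ([] for n = 0)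
def binRec (n : Nat) : List Char :=
  if h : n = 0 then [] else binRec (n / 2) ++ [bitChar (n % 2)]
decreasing_by exact Nat.div_lt_self (Nat.pos_of_ne_zero h) one_lt_two

-- bin(n)[2:] as a character list (Python prints "0" for n = 0)
def binStr (n : Nat) : List Char := if n = 0 then ['0'] else binRec n

-- int(ans, 2): the value of a binary digit string
def val (l : List Char) : Nat :=
  l.foldl (fun a ch => 2 * a + (if ch = '1' then 1 else 0)) 0

-- while bin(num).count("1") < 3: num -= 1   (both Pythons share this loop verbatim)
def A_loop : Nat → Nat
  | 0 => 0
  | n + 1 => if (binStr (n + 1)).count '1' < 3 then A_loop n else n + 1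

def solve (num : Int) : Int :=
  if num < 7 then -1
  else
    Int.ofNat (val
      ((binStr (A_loop num.toNat)).foldl
        (fun (p : List Char × Nat) ch =>
          if ch = '1' ∧ p.2 < 3 then (p.1 ++ ['1'], p.2 + 1) else (p.1 ++ ['0'], p.2))
        ([], 0)).1)

-- ===== PORT B =====
-- termination fact the port needs: n & (n-1) strictly decreases on nonzero n
theorem land_pred_lt (n : Nat) (h : n ≠ 0) : n &&& (n - 1) < n :=
  Nat.lt_of_le_of_lt Nat.and_le_right (Nat.pred_lt h)

-- while bin(ans).count("1") > 3: ans &= ans - 1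
def B_loop (n : Nat) : Nat :=
  if h : 3 < (binStr n).count '1' then B_loop (n &&& (n - 1)) else n
decreasing_by
  exact land_pred_lt n (by rintro rfl; revert h; decide)

def solve_alt (num : Int) : Int :=
  if num < 7 then -1
  else Int.ofNat (B_loop (A_loop num.toNat))

-- ===== PRECONDITION & SPEC =====
def Spec_solve (num : Int) (out : Int) : Prop := out = solve_alt num
instance (num : Int) (out : Int) : Decidable (Spec_solve num out) := by unfold Spec_solve; infer_instance

-- ===== CLAIM (what is proved, stated in full; the proofs are below) =====
def Claim_equal_solve : Prop := ∀ (num : Int), Dom_solve num → Spec_solve num (solve num)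

-- ===== LEMMAS AND PROOFS =====

-- A's for-loop, as a recursion on the digit list: keep the first (3 - c) ones, zero the rest
def keep : Nat → List Char → List Char
  | _, [] => []
  | c, ch :: t => if ch = '1' ∧ c < 3 then '1' :: keep (c + 1) t else '0' :: keep c t

-- replace the last '1' of the list by '0'
def clearLast : List Char → List Char
  | [] => []
  | ch :: t =>
    if '1' ∈ t then ch :: clearLast t
    else if ch = '1' then '0' :: t else ch :: t

theorem foldA_eq_keep : ∀ (l acc : List Char) (c : Nat),
    (l.foldl
      (fun (p : List Char × Nat) ch =>
        if ch = '1' ∧ p.2 < 3 then (p.1 ++ ['1'], p.2 + 1) else (p.1 ++ ['0'], p.2))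
      (acc, c)).1
    = acc ++ keep c l := by
  intro l
  induction l with
  | nil => intro acc c; simp [keep]
  | cons ch t ih =>
    intro acc c
    by_cases h : ch = '1' ∧ c < 3
    · simp [List.foldl_cons, h, keep, ih]
    · simp [List.foldl_cons, h, keep, ih]

theorem val_snoc (l : List Char) (b : Char) :
    val (l ++ [b]) = 2 * val l + (if b = '1' then 1 else 0) := by
  simp [val, List.foldl_append]

theorem val_binRec : ∀ n : Nat, val (binRec n) = n := by
  intro n
  induction n using Nat.strong_induction_on with
  | _ n ih =>
    by_cases h : n = 0
    · subst h; simp [binRec, val]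
    · rw [binRec, dif_neg h, val_snoc, ih (n / 2) (Nat.div_lt_self (Nat.pos_of_ne_zero h) one_lt_two)]
      rcases Nat.mod_two_eq_zero_or_one n with h2 | h2 <;> simp [bitChar, h2] <;> omega

theorem binRec_mem : ∀ (n : Nat) (ch : Char), ch ∈ binRec n → ch = '0' ∨ ch = '1' := by
  intro n
  induction n using Nat.strong_induction_on with
  | _ n ih =>
    intro ch hch
    by_cases h : n = 0
    · subst h; simp [binRec] at hch
    · rw [binRec, dif_neg h] at hch
      rcases List.mem_append.mp hch with hm | hm
      · exact ih (n / 2) (Nat.div_lt_self (Nat.pos_of_ne_zero h) one_lt_two) ch hm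
      · simp [bitChar] at hm
        split at hm <;> simp [hm]

theorem keep_noop : ∀ (l : List Char) (c : Nat),
    (∀ ch ∈ l, ch = '0' ∨ ch = '1') → l.count '1' + c ≤ 3 → keep c l = l := by
  intro l
  induction l with
  | nil => intro c _ _; rfl
  | cons ch t ih =>
    intro c hmem hcount
    rcases hmem ch (by simp) with h0 | h1
    · subst h0
      have : ¬ (('0' : Char) = '1' ∧ c < 3) := by simp
      rw [keep, if_neg this, ih c (fun x hx => hmem x (by simp [hx]))]
      simp at hcount ⊢
      omega
    · subst h1
      have hc : (t.count '1') + 1 + c ≤ 3 := by simpa [List.count_cons] using hcount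
      have : (('1' : Char) = '1' ∧ c < 3) := ⟨rfl, by omega⟩
      rw [keep, if_pos this, ih (c + 1) (fun x hx => hmem x (by simp [hx])) (by omega)]

theorem clearLast_snoc_one : ∀ l : List Char, clearLast (l ++ ['1']) = l ++ ['0'] := by
  intro l
  induction l with
  | nil => simp [clearLast]
  | cons a t ih =>
    have h : '1' ∈ t ++ ['1'] := by simp
    simp [clearLast, h, ih]

theorem clearLast_snoc_zero : ∀ l : List Char, '1' ∈ l →
    clearLast (l ++ ['0']) = clearLast l ++ ['0'] := by
  intro l
  induction l with
  | nil => intro h; simp at h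
  | cons a t ih =>
    intro h
    by_cases ht : '1' ∈ t
    · have h2 : '1' ∈ t ++ ['0'] := by simp [ht]
      simp [clearLast, ht, h2, ih ht]
    · have ha : a = '1' := by
        rcases List.mem_cons.mp h with h' | h'
        · exact h'.symm
        · exact absurd h' ht
      have h2 : ¬ '1' ∈ t ++ ['0'] := by simp [ht]
      subst ha
      simp [clearLast, ht, h2]

theorem clearLast_length : ∀ l : List Char, (clearLast l).length = l.length := by
  intro l
  induction l with
  | nil => rfl
  | cons a t ih =>
    rw [clearLast]
    split
    · simp [ih]
    · split <;> simp

theorem keep_clearLast : ∀ (l : List Char) (c : Nat),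
    4 ≤ c + l.count '1' → keep c (clearLast l) = keep c l := by
  intro l
  induction l with
  | nil => intro c _; rfl
  | cons ch t ih =>
    intro c h
    by_cases ht : '1' ∈ t
    · have htc : 1 ≤ t.count '1' := List.count_pos_iff.mpr ht
      rw [clearLast, if_pos ht]
      by_cases hc : ch = '1' ∧ c < 3
      · rw [keep, if_pos hc, keep, if_pos hc, ih (c + 1) (by
          simp [hc.1] at h; omega)]
      · rw [keep, if_neg hc, keep, if_neg hc, ih c (by
          by_cases hch : ch = '1'
          · have : ¬ c < 3 := fun hlt => hc ⟨hch, hlt⟩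
            omega
          · simp [hch] at h; omega)]
    · have hct : t.count '1' = 0 := List.count_eq_zero.mpr ht
      by_cases hch : ch = '1'
      · subst hch
        have hc3 : ¬ c < 3 := by
          simp [hct] at h; omega
        rw [clearLast, if_neg ht, if_pos rfl]
        have h1 : ¬ (('0' : Char) = '1' ∧ c < 3) := by simp
        have h2 : ¬ (('1' : Char) = '1' ∧ c < 3) := by simp [hc3]
        rw [keep, if_neg h1, keep, if_neg h2]
      · rw [clearLast, if_neg ht, if_neg hch]

theorem land_odd (n : Nat) (h : n % 2 = 1) : n &&& (n - 1) = n - 1 := by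
  apply Nat.eq_of_testBit_eq
  intro i
  rw [Nat.testBit_and]
  cases i with
  | zero =>
    have h0 : (n - 1) % 2 = 0 := by omega
    simp [Nat.testBit_zero, h, h0]
  | succ i =>
    rw [Nat.testBit_succ, Nat.testBit_succ]
    have : (n - 1) / 2 = n / 2 := by omega
    rw [this, Bool.and_self]

theorem land_even (n : Nat) (h : n % 2 = 0) : n &&& (n - 1) = 2 * ((n / 2) &&& (n / 2 - 1)) := by
  apply Nat.eq_of_testBit_eq
  intro i
  rw [Nat.testBit_and]
  cases i with
  | zero =>
    simp [Nat.testBit_zero, h, Nat.mul_mod_right]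
  | succ i =>
    rw [Nat.testBit_succ, Nat.testBit_succ, Nat.testBit_succ,
      Nat.mul_div_cancel_left _ (by norm_num : (0:Nat) < 2), Nat.testBit_and]
    have : (n - 1) / 2 = n / 2 - 1 := by omega
    rw [this]

theorem binRec_ne_nil (n : Nat) (h : n ≠ 0) : binRec n ≠ [] := by
  rw [binRec, dif_neg h]; simp

theorem binRec_clr : ∀ n : Nat, 2 ≤ (binRec n).count '1' →
    binRec (n &&& (n - 1)) = clearLast (binRec n) := by
  intro n
  induction n using Nat.strong_induction_on with
  | _ n ih =>
    intro h2
    have hn : n ≠ 0 := by rintro rfl; simp [binRec] at h2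
    rcases Nat.mod_two_eq_zero_or_one n with he | ho
    · -- even: the cleared bit lives in n / 2
      have hrec : binRec n = binRec (n / 2) ++ ['0'] := by
        rw [binRec, dif_neg hn, he]; rfl
      have hcnt : 2 ≤ (binRec (n / 2)).count '1' := by
        rw [hrec] at h2; simpa using h2
      have hk : n / 2 ≠ 0 := by
        intro h0; rw [h0] at hcnt; simp [binRec] at hcnt
      have ih' := ih (n / 2) (Nat.div_lt_self (Nat.pos_of_ne_zero hn) one_lt_two) hcnt
      have hk' : (n / 2) &&& (n / 2 - 1) ≠ 0 := by
        intro h0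
        rw [h0] at ih'
        have : ([] : List Char).length = (binRec (n / 2)).length := by
          rw [show binRec 0 = [] from by simp [binRec]] at ih'
          rw [ih', clearLast_length]
        exact binRec_ne_nil _ hk (List.length_eq_zero_iff.mp this.symm)
      rw [land_even n he, hrec,
        clearLast_snoc_zero _ (List.count_pos_iff.mp (by omega)),
        ← ih', binRec, dif_neg (by positivity : 2 * ((n / 2) &&& (n / 2 - 1)) ≠ 0)]
      rw [Nat.mul_div_cancel_left _ (by norm_num : (0:Nat) < 2), Nat.mul_mod_right]
      rfl
    · -- odd: clearing the lowest bit is n - 1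
      have hrec : binRec n = binRec (n / 2) ++ ['1'] := by
        rw [binRec, dif_neg hn, ho]; rfl
      have hne1 : n ≠ 1 := by
        rintro rfl
        simp [binRec, bitChar] at h2
      rw [land_odd n ho, hrec, clearLast_snoc_one]
      rw [binRec, dif_neg (by omega : n - 1 ≠ 0)]
      have h1 : (n - 1) % 2 = 0 := by omega
      have h2' : (n - 1) / 2 = n / 2 := by omega
      rw [h1, h2']
      rfl

theorem main_lemma : ∀ m : Nat, val (keep 0 (binStr m)) = B_loop m := by
  intro m
  induction m using Nat.strong_induction_on with
  | _ m ih =>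
    by_cases hm : m = 0
    · subst hm
      rw [B_loop]
      simp [binStr, keep, val]
    · rcases Nat.lt_or_ge ((binStr m).count '1') 4 with hle | hge
      · have hB : B_loop m = m := by rw [B_loop, dif_neg (by omega)]
        rw [hB, binStr, if_neg hm,
          keep_noop _ 0 (binRec_mem m) (by rw [binStr, if_neg hm] at hle; omega),
          val_binRec]
      · have hbs : binStr m = binRec m := if_neg hm
        have h2 : 2 ≤ (binRec m).count '1' := by rw [hbs] at hge; omega
        have hcl : binRec (m &&& (m - 1)) = clearLast (binRec m) := binRec_clr m h2
        have hne : m &&& (m - 1) ≠ 0 := by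
          intro h0
          rw [h0] at hcl
          have : ([] : List Char).length = (binRec m).length := by
            rw [show binRec 0 = [] from by simp [binRec]] at hcl
            rw [hcl, clearLast_length]
          exact binRec_ne_nil _ hm (List.length_eq_zero_iff.mp this.symm)
        calc val (keep 0 (binStr m))
            = val (keep 0 (clearLast (binRec m))) := by
              rw [hbs, keep_clearLast _ 0 (by rw [← hbs]; omega)]
          _ = val (keep 0 (binStr (m &&& (m - 1)))) := by
              rw [binStr, if_neg hne, hcl]
          _ = B_loop (m &&& (m - 1)) := ih _ (land_pred_lt m hm)
          _ = B_loop m := by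
              rw [show B_loop m = B_loop (m &&& (m - 1)) from by
                rw [B_loop, dif_pos (show 3 < (binStr m).count '1' by omega)]]

-- ===== VERDICT (by name: the statement is the Claim_ definition above) =====
theorem solve_spec : Claim_equal_solve := by
  intro num _
  unfold Spec_solve solve solve_alt
  by_cases h : num < 7
  · simp [h]
  · rw [if_neg h, if_neg h, foldA_eq_keep, List.nil_append, main_lemma]
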